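-- pv_equiv track=rewrite | github.com/dmitry487/python-Ege2024 | ege/ege4/9/10091/10091.py | check
-- ===== SOURCE A (Python) =====
-- def check(row):
--     povtor = []
--     nepovtor = []
--     for num in row:
--         if row.count(num) == 1:
--             nepovtor.append(num)
--         else:
--             povtor.append(num)
--     if (
--         (
--             (len(set(row))) == 5
--         )and
--         (
--             (sum(povtor)//len(povtor)) < (sum(row)//len(row))
--         )
--     ):return True
--     return False
-- ===== SOURCE B (Python) =====
-- def check(row):
--     s = sorted(row)
--     n = len(s)
--     distinct = sum_rep = len_rep = 0
--     i = 0
--     while i < n: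
--         j = i + 1
--         while j < n and s[j] == s[i]:
--             j += 1
--         distinct += 1
--         if j - i > 1:
--             sum_rep += s[i] * (j - i)
--             len_rep += j - i
--         i = j
--     if distinct != 5:
--         return False
--     return sum_rep // len_rep < sum(row) // len(row)
-- ===== Notes on version B (the rewrite author's own statement) =====
-- stated objective: faster
-- what changed: Instead of scanning row once per element with row.count and building two lists, B sorts the row and makes a single run-length scan over the sorted list, accumulating the distinct count and the repeated elements' sum and multiplicity from maximal runs of equal values.
import Mathlib
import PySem

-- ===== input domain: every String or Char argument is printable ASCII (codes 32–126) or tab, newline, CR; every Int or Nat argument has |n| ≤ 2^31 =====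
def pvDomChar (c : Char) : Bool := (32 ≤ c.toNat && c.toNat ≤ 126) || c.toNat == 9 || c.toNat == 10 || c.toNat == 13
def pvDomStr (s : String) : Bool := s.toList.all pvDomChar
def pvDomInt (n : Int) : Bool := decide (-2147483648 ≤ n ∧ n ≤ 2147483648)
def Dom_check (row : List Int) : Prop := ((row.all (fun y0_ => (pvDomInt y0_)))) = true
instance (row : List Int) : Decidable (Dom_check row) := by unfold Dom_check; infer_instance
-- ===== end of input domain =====

-- B sorts the row and scans it once, aggregating the distinct count and the repeated
-- elements' sum and multiplicity from maximal runs of equal values (alternative algorithm: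
-- sort + run-length scan instead of per-element counting).

-- ===== PORT A =====
def check (row : List Int) : Bool :=
  let pn := row.foldl
    (fun (acc : List Int × List Int) num =>
      if PySem.List.count row num == 1 then (acc.1, acc.2 ++ [num])
      else (acc.1 ++ [num], acc.2)) ([], [])
  let povtor := pn.1
  if (PySem.Set.len (PySem.Set.ofList row) == 5)
      && decide (PySem.Int.floordiv povtor.sum (povtor.length : Int)
                 < PySem.Int.floordiv row.sum (row.length : Int))
  then true else false

-- ===== PORT B =====
-- the run scan: walks the sorted list, one maximal run of equal values at a time,
-- returning (distinct, sum_rep, len_rep) — Source B's while loop over runs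
def runScan : List Int → Int × Int × Int
  | [] => (0, 0, 0)
  | x :: xs =>
    let cnt : Int := 1 + (xs.takeWhile (fun y => y == x)).length
    let r := runScan (xs.dropWhile (fun y => y == x))
    (r.1 + 1,
     if 1 < cnt then r.2.1 + x * cnt else r.2.1,
     if 1 < cnt then r.2.2 + cnt else r.2.2)
termination_by l => l.length
decreasing_by
  simpa using Nat.lt_succ_of_le (List.length_dropWhile_le _ _)

def check_alt (row : List Int) : Bool :=
  let r := runScan (PySem.List.sorted row (fun x => x) false)
  if r.1 ≠ 5 then false
  else decide (PySem.Int.floordiv r.2.1 r.2.2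
               < PySem.Int.floordiv row.sum (row.length : Int))

-- ===== PRECONDITION & SPEC =====
-- Pre_ excludes exactly the rows with 5 distinct values and no duplicate (a nodup list of
-- length 5): there the Python A raises ZeroDivisionError (povtor is empty), and B raises too.
def Pre_check (row : List Int) : Prop := ¬ (row.Nodup ∧ row.length = 5)
instance (row : List Int) : Decidable (Pre_check row) := by unfold Pre_check; infer_instance
def pvWitness_check : List Int := [1, 1, 2, 3, 4, 5]

def Spec_check (row : List Int) (out : Bool) : Prop := out = check_alt row
instance (row : List Int) (out : Bool) : Decidable (Spec_check row out) := by unfold Spec_check; infer_instance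

-- ===== CLAIM (what is proved, stated in full; the proofs are below) =====
def Claim_equal_check : Prop := ∀ (row : List Int), Dom_check row → Pre_check row → Spec_check row (check row)

-- ===== LEMMAS AND PROOFS =====

-- A's fold splits row into (repeated, unique) by filtering.
lemma pair_fold_eq_filter (row l : List Int) (a b : List Int) :
    l.foldl (fun (acc : List Int × List Int) num =>
      if PySem.List.count row num == 1 then (acc.1, acc.2 ++ [num])
      else (acc.1 ++ [num], acc.2)) (a, b)
    = (a ++ l.filter (fun x => !(PySem.List.count row x == 1)),
       b ++ l.filter (fun x => PySem.List.count row x == 1)) := by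
  induction l generalizing a b with
  | nil => simp
  | cons x l ih =>
      simp only [List.foldl_cons, List.filter_cons]
      by_cases h : PySem.List.count row x == 1
      · simp only [h, if_pos, Bool.not_true]
        rw [ih]
        simp
      · simp only [h, Bool.not_false, Bool.false_eq_true, if_false]
        rw [ih]
        simp

-- in a sorted list whose head is x, x does not reappear after its initial run
lemma not_mem_dropWhile_beq (x : Int) (xs : List Int)
    (hle : ∀ y ∈ xs, x ≤ y) (hpw : xs.Pairwise (· ≤ ·)) :
    x ∉ xs.dropWhile (fun y => y == x) := by
  induction xs with
  | nil => simp
  | cons y t ih =>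
      by_cases h : (y == x) = true
      · rw [List.dropWhile_cons, if_pos h]
        exact ih (fun z hz => hle z (List.mem_cons_of_mem _ hz))
          (List.pairwise_cons.mp hpw).2
      · rw [List.dropWhile_cons, if_neg h]
        intro hmem
        have hyx : y ≠ x := by simpa using h
        rcases List.mem_cons.mp hmem with h1 | h1
        · exact hyx h1.symm
        · have h2 : y ≤ x := (List.pairwise_cons.mp hpw).1 x h1
          have h3 : x ≤ y := hle y (List.mem_cons_self ..)
          exact hyx (le_antisymm h2 h3)

-- the initial run is a replicate of the head
lemma takeWhile_beq_replicate (x : Int) (xs : List Int) :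
    xs.takeWhile (fun y => y == x)
      = List.replicate (xs.takeWhile (fun y => y == x)).length x := by
  apply List.eq_replicate_of_mem
  intro b hb
  have := List.mem_takeWhile_imp hb
  simpa using this

-- characterisation of the run scan on a sorted list
lemma runScan_sorted : ∀ (n : Nat) (s : List Int), s.length ≤ n → s.Pairwise (· ≤ ·) →
    runScan s = (((PySem.Set.ofList s).length : Int),
      (s.filter (fun z => decide (1 < s.count z))).sum,
      ((s.filter (fun z => decide (1 < s.count z))).length : Int)) := by
  intro n
  induction n with
  | zero =>
      intro s hlen _
      have : s = [] := List.length_eq_zero_iff.mp (Nat.le_zero.mp hlen)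
      subst this
      simp [runScan, PySem.Set.ofList]
  | succ n ih =>
      intro s hlen hpw
      match s with
      | [] => simp [runScan, PySem.Set.ofList]
      | x :: xs =>
        obtain ⟨k, hk⟩ : ∃ k, (xs.takeWhile (fun y => y == x)).length = k := ⟨_, rfl⟩
        obtain ⟨rest, hrest⟩ : ∃ r, xs.dropWhile (fun y => y == x) = r := ⟨_, rfl⟩
        have hrun : xs.takeWhile (fun y => y == x) = List.replicate k x := by
          rw [← hk]; exact takeWhile_beq_replicate x xs
        have hxs : xs = List.replicate k x ++ rest := by
          rw [← hrun, ← hrest]; exact (List.takeWhile_append_dropWhile).symm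
        have hle : ∀ y ∈ xs, x ≤ y := fun y hy => (List.pairwise_cons.mp hpw).1 y hy
        have hpwxs : xs.Pairwise (· ≤ ·) := (List.pairwise_cons.mp hpw).2
        have hnx : x ∉ rest := hrest ▸ not_mem_dropWhile_beq x xs hle hpwxs
        have hpwrest : rest.Pairwise (· ≤ ·) :=
          hpwxs.sublist (hrest ▸ List.dropWhile_sublist _)
        have hlenrest : rest.length ≤ n := by
          have h1 := List.length_dropWhile_le (fun y => y == x) xs
          rw [hrest] at h1
          simp only [List.length_cons] at hlen
          omega
        have hIH := ih rest hlenrest hpwrest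
        have hcnt0 : rest.count x = 0 := List.count_eq_zero.mpr hnx
        have hsplit : x :: xs = List.replicate (k + 1) x ++ rest := by
          rw [hxs, List.replicate_succ]
          simp
        have hcL : (List.replicate (k + 1) x ++ rest).count x = k + 1 := by
          simp [List.count_append, hcnt0]
        have hcy : ∀ y ∈ rest,
            (List.replicate (k + 1) x ++ rest).count y = rest.count y := by
          intro y hy
          have hyx : (y = x) → False := fun e => hnx (e ▸ hy)
          simp [List.count_append, List.count_replicate]
          intro e
          exact absurd e.symm hyx
        -- the filter over s splits into the head run (if repeated) and the rest's filter
        have hfilter : (x :: xs).filter (fun z => decide (1 < (x :: xs).count z))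
            = (if 0 < k then List.replicate (k + 1) x else [])
              ++ rest.filter (fun z => decide (1 < rest.count z)) := by
          rw [hsplit, List.filter_append]
          congr 1
          · rw [List.filter_replicate, hcL]
            by_cases hk0 : 0 < k
            · have h1 : 1 < k + 1 := by omega
              simp [hk0, h1]
            · have h1 : ¬ (1 < k + 1) := by omega
              simp [hk0, h1]
          · exact List.filter_congr (fun y hy => by rw [hcy y hy])
        -- distinct count: Set.ofList (x :: xs) ~ x :: Set.ofList rest
        have hset : (PySem.Set.ofList (x :: xs)).length
            = (PySem.Set.ofList rest).length + 1 := by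
          have hperm : (PySem.Set.ofList (x :: xs)).Perm (x :: PySem.Set.ofList rest) := by
            rw [List.perm_ext_iff_of_nodup (PySem.Set.nodup_ofList _)
              (by simp [List.nodup_cons, PySem.Set.nodup_ofList,
                    (PySem.Set.mem_ofList rest x), hnx])]
            intro a
            simp only [PySem.Set.mem_ofList, List.mem_cons, hxs, List.mem_append]
            constructor
            · rintro (h | h | h)
              · exact Or.inl h
              · exact Or.inl (by simpa using List.eq_of_mem_replicate h)
              · exact Or.inr h
            · rintro (h | h)
              · exact Or.inl h
              · exact Or.inr (Or.inr h)
          simpa using hperm.length_eq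
        -- assemble
        show runScan (x :: xs) = _
        rw [runScan, hk, hrest, hIH, hfilter, hset]
        by_cases hk0 : 0 < k
        · have hcnt : (1 : Int) < 1 + (k : Int) := by
            have : (0 : Int) < (k : Int) := by exact_mod_cast hk0
            omega
          simp only [hk0, if_pos, hcnt]
          refine Prod.ext (by push_cast; ring) (Prod.ext ?_ ?_)
          · simp [List.sum_append, List.sum_replicate]
            ring
          · simp [List.length_append, List.length_replicate]
            ring
        · have hk' : k = 0 := by omega
          have hcnt : ¬ ((1 : Int) < 1 + (k : Int)) := by
            simp [hk']
          simp [hk']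

-- the run scan on sorted(row), transferred back to row
lemma runScan_sorted_row (row : List Int) :
    runScan (PySem.List.sorted row (fun x => x) false)
      = (((PySem.Set.ofList row).length : Int),
         (row.filter (fun z => decide (1 < row.count z))).sum,
         ((row.filter (fun z => decide (1 < row.count z))).length : Int)) := by
  have hperm : (PySem.List.sorted row (fun x => x) false).Perm row := PySem.List.sorted_perm ..
  have hpw : (PySem.List.sorted row (fun x => x) false).Pairwise (· ≤ ·) := by
    have := PySem.List.sorted_pairwise row (fun x => x)
    simpa using this
  rw [runScan_sorted (PySem.List.sorted row (fun x => x) false).length _ le_rfl hpw]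
  have hflt : (PySem.List.sorted row (fun x => x) false).filter
        (fun z => decide (1 < (PySem.List.sorted row (fun x => x) false).count z))
      = (PySem.List.sorted row (fun x => x) false).filter
        (fun z => decide (1 < row.count z)) := by
    apply List.filter_congr
    intro y _
    rw [hperm.count_eq]
  have hfp : ((PySem.List.sorted row (fun x => x) false).filter
        (fun z => decide (1 < row.count z))).Perm
      (row.filter (fun z => decide (1 < row.count z))) := hperm.filter _
  have hsetlen : (PySem.Set.ofList (PySem.List.sorted row (fun x => x) false)).length
      = (PySem.Set.ofList row).length := by
    have hp : (PySem.Set.ofList (PySem.List.sorted row (fun x => x) false)).Perm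
        (PySem.Set.ofList row) := by
      rw [List.perm_ext_iff_of_nodup (PySem.Set.nodup_ofList _) (PySem.Set.nodup_ofList _)]
      intro a
      rw [PySem.Set.mem_ofList, PySem.Set.mem_ofList, hperm.mem_iff]
    exact hp.length_eq
  rw [hflt, hsetlen, hfp.sum_eq, hfp.length_eq]

-- A's filter predicate agrees with '1 < count' on members of row
lemma filter_pred_eq (row : List Int) :
    row.filter (fun x => !(PySem.List.count row x == 1))
      = row.filter (fun z => decide (1 < row.count z)) := by
  apply List.filter_congr
  intro y hy
  have hpos : 0 < row.count y := List.count_pos_iff.mpr hy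
  simp only [PySem.List.count]
  rcases Nat.lt_or_ge 1 (row.count y) with h | h
  · simp [h]; omega
  · have he : row.count y = 1 := by omega
    simp [he]

-- ===== VERDICT (by name: the statement is the Claim_ definition above) =====
theorem check_spec : Claim_equal_check := by
  intro row _ _
  unfold Spec_check check check_alt
  rw [pair_fold_eq_filter row row [] [], runScan_sorted_row]
  simp only [List.nil_append, filter_pred_eq]
  set q := row.filter (fun z => decide (1 < row.count z)) with hq
  by_cases h5 : (PySem.Set.ofList row).length = 5
  · simp [PySem.Set.len, h5]
  · have h5' : ¬ (((PySem.Set.ofList row).length : Int) = 5) := by exact_mod_cast h5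
    simp [PySem.Set.len, h5']
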